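-- pv_equiv track=rewrite | github.com/tonigvz/PracticePython | solutions/evenandodd/evenandodd.py | even_and_odd
-- ===== SOURCE A (Python) =====
-- def even_and_odd(n):
--     ne = ""
--     no = ""
--     for i in str(n):
--         if int(i) % 2 == 0:
--             ne += i
--         else:
--             no += i
--     if ne and no:
--         return (int(ne), int(no))
--     elif not ne:
--         return (0, int(no))
--     else:
--         return (int(ne), 0)
-- ===== SOURCE B (Python) =====
-- def even_and_odd(n):
--     even, odd, pe, po = 0, 0, 1, 1
--     while n > 0:
--         n, d = divmod(n, 10)
--         if d % 2 == 0:
--             even += d * pe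
--             pe *= 10
--         else:
--             odd += d * po
--             po *= 10
--     return (even, odd)
-- ===== Notes on version B (the rewrite author's own statement) =====
-- stated objective: alternative
-- what changed: B never converts to a string at all: it peels digits off n arithmetically with divmod(n,10) (least-significant first) and rebuilds the two results with running place-value multipliers, whereas A builds two digit strings left-to-right and re-parses them with int() behind a three-way emptiness branch.
import Mathlib
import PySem

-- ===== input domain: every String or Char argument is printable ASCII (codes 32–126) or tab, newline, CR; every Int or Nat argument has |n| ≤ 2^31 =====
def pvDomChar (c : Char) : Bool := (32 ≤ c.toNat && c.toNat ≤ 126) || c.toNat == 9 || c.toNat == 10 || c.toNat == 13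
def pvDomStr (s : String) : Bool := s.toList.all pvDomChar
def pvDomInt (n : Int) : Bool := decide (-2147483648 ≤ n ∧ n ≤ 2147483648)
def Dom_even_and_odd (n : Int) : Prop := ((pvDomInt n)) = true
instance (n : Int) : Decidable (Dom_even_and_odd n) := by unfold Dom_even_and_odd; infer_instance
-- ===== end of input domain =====

-- B replaces A's string-building partition (two digit strings, int() re-parse, three-way
-- emptiness branch) by pure arithmetic: divmod(n,10) peels digits least-significant first and
-- two place-value multipliers rebuild the even and odd numbers directly.


-- ===== PORT A =====
-- Builds the even-digit and odd-digit strings, then converts with int().  `.getD 0` after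
-- `PySem.Int.ofChars?` marks where Python would raise ValueError; it is unreachable inside
-- Pre_ (for n ≥ 0 every character of str(n) is a digit, and each converted string is
-- nonempty on the branch A converts it on).
def even_and_odd (n : Int) : Int × Int :=
  let p := (PySem.Int.toChars n).foldl
    (fun (acc : List Char × List Char) i =>
      if PySem.Int.mod ((PySem.Int.ofChars? [i]).getD 0) 2 == 0 then (acc.1 ++ [i], acc.2)
      else (acc.1, acc.2 ++ [i]))
    ([], [])
  if p.1 ≠ [] ∧ p.2 ≠ [] then ((PySem.Int.ofChars? p.1).getD 0, (PySem.Int.ofChars? p.2).getD 0)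
  else if p.1 = [] then (0, (PySem.Int.ofChars? p.2).getD 0)
  else ((PySem.Int.ofChars? p.1).getD 0, 0)

-- ===== PORT B =====
-- the while-loop of Source B: n, d = divmod(n, 10); even/odd and their place multipliers updated
def evenOddGo (n e o pe po : Int) : Int × Int :=
  if h : 0 < n then
    let d := PySem.Int.mod n 10
    if PySem.Int.mod d 2 == 0 then
      evenOddGo (PySem.Int.floordiv n 10) (e + d * pe) o (pe * 10) po
    else
      evenOddGo (PySem.Int.floordiv n 10) e (o + d * po) pe (po * 10)
  else (e, o)
termination_by n.toNat
decreasing_by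
  all_goals
    have hn : n = (n.toNat : Int) := (Int.toNat_of_nonneg h.le).symm
    rw [hn, show ((10:Int)) = ((10:Nat):Int) from rfl, PySem.Int.floordiv_natCast]
    simp only [Int.toNat_natCast]
    exact Nat.div_lt_self (by omega) (by norm_num)

def even_and_odd_alt (n : Int) : Int × Int := evenOddGo n 0 0 1 1

-- ===== PRECONDITION & SPEC =====
-- Pre_ excludes exactly n < 0, where A raises ValueError (int('-') on the sign character of str(n)).
def Pre_even_and_odd (n : Int) : Prop := 0 ≤ n
instance (n : Int) : Decidable (Pre_even_and_odd n) := by unfold Pre_even_and_odd; infer_instance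
def pvWitness_even_and_odd : Int := 1230
def Spec_even_and_odd (n : Int) (out : Int × Int) : Prop := out = even_and_odd_alt n
instance (n : Int) (out : Int × Int) : Decidable (Spec_even_and_odd n out) := by unfold Spec_even_and_odd; infer_instance

-- ===== CLAIM (what is proved, stated in full; the proofs are below) =====
def Claim_equal_even_and_odd : Prop := ∀ (n : Int), Dom_even_and_odd n → Pre_even_and_odd n → Spec_even_and_odd n (even_and_odd n)

-- ===== LEMMAS AND PROOFS =====

-- numeric value of a digit string (what int() returns on it)
def pvVal (ds : List Char) : Nat := ds.foldl (fun x c => x * 10 + (c.toNat - 48)) 0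

-- numeric value of a list of digits, most significant first
def pvValN (ds : List Nat) : Nat := ds.foldl (fun x d => x * 10 + d) 0

def pvDOf (c : Char) : Nat := c.toNat - 48

def pvEvenC (c : Char) : Bool := PySem.Int.mod ((PySem.Int.ofChars? [c]).getD 0) 2 == 0

def pvEvenN (d : Nat) : Bool := d % 2 == 0

-- A's loop body, named
def pvStepA (acc : List Char × List Char) (i : Char) : List Char × List Char :=
  if PySem.Int.mod ((PySem.Int.ofChars? [i]).getD 0) 2 == 0 then (acc.1 ++ [i], acc.2)
  else (acc.1, acc.2 ++ [i])

-- digits of m, most significant first, empty for 0 (B's traversal order, reversed)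
def pvNatDigs (m : Nat) : List Nat :=
  if h : m = 0 then [] else pvNatDigs (m / 10) ++ [m % 10]
decreasing_by exact Nat.div_lt_self (Nat.pos_of_ne_zero h) (by norm_num)

-- the characters str prints for m (what Nat.toDigits produces)
def pvChDigs (m : Nat) : List Char :=
  if h : m < 10 then [Nat.digitChar m]
  else pvChDigs (m / 10) ++ [Nat.digitChar (m % 10)]
decreasing_by exact Nat.div_lt_self (by omega) (by norm_num)

theorem pvDigit_bounds (c : Char) (h : c.isDigit = true) : 48 ≤ c.toNat ∧ c.toNat ≤ 57 := by
  simp only [Char.isDigit, Bool.and_eq_true, decide_eq_true_eq] at h; exact h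

theorem pvGoSpec {g : List Char → Bool → Nat → Option Nat}
    (h0 : ∀ a, g [] true a = some a)
    (h1 : ∀ c r b a, c.isDigit = true → g (c :: r) b a = g r true (a * 10 + (c.toNat - '0'.toNat))) :
    ∀ ds a, (∀ c ∈ ds, c.isDigit = true) →
      g ds true a = some (ds.foldl (fun x c => x * 10 + (c.toNat - 48)) a) := by
  intro ds
  induction ds with
  | nil => intro a _; simp [h0]
  | cons c r ih =>
    intro a h
    rw [h1 c r true a (h c (by simp))]
    have hz : c.toNat - '0'.toNat = c.toNat - 48 := rfl
    rw [hz]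
    simpa using ih _ (fun x hx => h x (by simp [hx]))

theorem pvParseAux {G : List Char → Option Nat} {g : List Char → Bool → Nat → Option Nat}
    (hG : ∀ c r, c.isDigit = true → G (c :: r) = g r true (0 * 10 + (c.toNat - '0'.toNat)))
    (h1 : ∀ c r b a, c.isDigit = true → g (c :: r) b a = g r true (a * 10 + (c.toNat - '0'.toNat)))
    (h0 : ∀ a, g [] true a = some a)
    (c : Char) (r : List Char) (h : ∀ x ∈ c :: r, x.isDigit = true) :
    (Option.map (fun n : Int => n) ((G (c :: r)).bind (fun a : Nat => pure ((a : Int))))) = some ((pvVal (c :: r) : Int)) := by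
  rw [hG c r (h c (by simp))]
  rw [pvGoSpec h0 h1 r _ (fun x hx => h x (by simp [hx]))]
  simp only [Option.bind_some]
  have hv : pvVal (c :: r) = r.foldl (fun x c => x * 10 + (c.toNat - 48)) (0 * 10 + (c.toNat - '0'.toNat)) := rfl
  rw [hv]
  rfl

theorem pvNotSpace (c : Char) (h : c.isDigit = true) : PySem.Int.isIntSpace c = false := by
  have hb := pvDigit_bounds c h
  simp only [PySem.Int.isIntSpace, Bool.or_eq_false_iff, decide_eq_false_iff_not]
  refine ⟨⟨⟨⟨⟨?_, ?_⟩, ?_⟩, ?_⟩, ?_⟩, ?_⟩ <;> (intro he; subst he; simp at hb)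

theorem pvNoSpace (ds : List Char) (h : ∀ c ∈ ds, c.isDigit = true) :
    ds.dropWhile PySem.Int.isIntSpace = ds := by
  cases ds with
  | nil => rfl
  | cons c r => rw [List.dropWhile_cons_of_neg (by simp [pvNotSpace c (h c (by simp))])]

-- int(ds) = the decimal value of a nonempty digit string ds
theorem pvParse (ds : List Char) (hne : ds ≠ []) (h : ∀ c ∈ ds, c.isDigit = true) :
    PySem.Int.ofChars? ds = some (pvVal ds : Int) := by
  obtain ⟨c, r, rfl⟩ : ∃ c r, ds = c :: r := by
    cases ds with | nil => simp at hne | cons a b => exact ⟨a, b, rfl⟩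
  have hstrip1 : (c :: r).dropWhile PySem.Int.isIntSpace = c :: r := pvNoSpace _ h
  have hstrip2 : ((c :: r).reverse).dropWhile PySem.Int.isIntSpace = (c :: r).reverse := by
    apply pvNoSpace; intro x hx; exact h x (List.mem_reverse.mp hx)
  simp only [PySem.Int.ofChars?, hstrip1, hstrip2, List.reverse_reverse]
  split
  · rename_i ds' heq
    obtain ⟨h1, h2⟩ := List.cons_eq_cons.mp heq
    have := pvDigit_bounds c (h c (by simp))
    subst h1; simp [Char.toNat] at this
  · rename_i ds' heq
    obtain ⟨h1, h2⟩ := List.cons_eq_cons.mp heq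
    have := pvDigit_bounds c (h c (by simp))
    subst h1; simp [Char.toNat] at this
  · apply pvParseAux (c := c) (r := r) (h := h)
    · intro c' r' hdc
      conv_lhs => whnf
      rw [Subsingleton.elim (instDecidableEqBool c'.isDigit true) (.isTrue hdc)]
    · intro c' r' b a hdc
      conv_lhs => whnf
      rw [Subsingleton.elim (instDecidableEqBool c'.isDigit true) (.isTrue hdc)]
    · intro a
      conv_lhs => whnf

theorem pvParse_single (c : Char) (h : c.isDigit = true) :
    (PySem.Int.ofChars? [c]).getD 0 = ((c.toNat - 48 : Nat) : Int) := by
  rw [pvParse [c] (by simp) (by simpa using h)]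
  simp [pvVal]

theorem pvDigitChar_isDigit (k : Nat) (h : k < 10) : (Nat.digitChar k).isDigit = true := by
  interval_cases k <;> decide

theorem pvDigitChar_val (k : Nat) (h : k < 10) : pvDOf (Nat.digitChar k) = k := by
  interval_cases k <;> decide

-- pvEvenC is a parity test on the digit's value
theorem pvEvenC_eq (c : Char) (h : c.isDigit = true) : pvEvenC c = pvEvenN (pvDOf c) := by
  unfold pvEvenC pvEvenN
  rw [pvParse_single c h]
  have hc : PySem.Int.mod ((c.toNat - 48 : Nat) : Int) 2 = (((c.toNat - 48) % 2 : Nat) : Int) := by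
    exact_mod_cast PySem.Int.mod_natCast (c.toNat - 48) 2
  rw [hc]
  rcases Nat.mod_two_eq_zero_or_one (c.toNat - 48) with h2 | h2 <;> simp [pvDOf, h2]

-- A's fold is a pair of filters
theorem pvFoldA : ∀ (cs : List Char) (ne no : List Char),
    cs.foldl pvStepA (ne, no)
      = (ne ++ cs.filter pvEvenC, no ++ cs.filter (fun c => !pvEvenC c)) := by
  intro cs
  induction cs with
  | nil => intro ne no; simp
  | cons c cs ih =>
    intro ne no
    simp only [List.foldl_cons, pvStepA, List.filter_cons]
    by_cases h : pvEvenC c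
    · have h' : (PySem.Int.mod ((PySem.Int.ofChars? [c]).getD 0) 2 == 0) = true := h
      simp only [h']
      simp [h, ih]
    · have h' : (PySem.Int.mod ((PySem.Int.ofChars? [c]).getD 0) 2 == 0) = false := by
        simpa [pvEvenC] using h
      simp only [h']
      simp [h, ih]

theorem pvVal_eq_valN (cs : List Char) : pvVal cs = pvValN (cs.map pvDOf) := by
  simp [pvVal, pvValN, List.foldl_map, pvDOf]

theorem pvValN_append (ds : List Nat) (d : Nat) :
    pvValN (ds ++ [d]) = pvValN ds * 10 + d := by
  simp [pvValN, List.foldl_append]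

-- Nat.toDigitsCore with enough fuel is pvChDigs
theorem pvCore : ∀ (f m : Nat) (ds : List Char), m < f →
    Nat.toDigitsCore 10 f m ds = pvChDigs m ++ ds := by
  intro f
  induction f with
  | zero => intro m ds h; omega
  | succ f ih =>
    intro m ds h
    rw [Nat.toDigitsCore]
    by_cases h10 : m < 10
    · have hz : m / 10 = 0 := Nat.div_eq_of_lt h10
      rw [pvChDigs]
      simp [hz, Nat.mod_eq_of_lt h10, h10]
    · have hz : m / 10 ≠ 0 := by omega
      simp only [hz, if_false]
      rw [ih (m / 10) _ (by have := Nat.div_lt_self (show 0 < m by omega) (show 1 < 10 by norm_num); omega)]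
      conv_rhs => rw [pvChDigs]
      simp [h10]

theorem pvToDigits_eq (m : Nat) : Nat.toDigits 10 m = pvChDigs m := by
  rw [Nat.toDigits, pvCore (m + 1) m [] (by omega)]
  simp

theorem pvChDigs_digits (m : Nat) : ∀ c ∈ pvChDigs m, c.isDigit = true := by
  induction m using Nat.strong_induction_on with
  | _ m ih =>
    rw [pvChDigs]
    by_cases h : m < 10
    · simp only [h, dif_pos]
      intro c hc; simp at hc; subst hc; exact pvDigitChar_isDigit m h
    · simp only [h, dif_neg, not_false_iff]
      intro c hc
      rcases List.mem_append.mp hc with hc | hc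
      · exact ih (m / 10) (Nat.div_lt_self (by omega) (by norm_num)) c hc
      · simp at hc; subst hc; exact pvDigitChar_isDigit _ (Nat.mod_lt _ (by norm_num))

theorem pvChDigs_ne_nil (m : Nat) : pvChDigs m ≠ [] := by
  rw [pvChDigs]; by_cases h : m < 10 <;> simp [h]

theorem pvChDigs_map (m : Nat) (hm : m ≠ 0) : (pvChDigs m).map pvDOf = pvNatDigs m := by
  induction m using Nat.strong_induction_on with
  | _ m ih =>
  rw [pvChDigs, pvNatDigs, dif_neg hm]
  by_cases h : m < 10
  · have hz : m / 10 = 0 := Nat.div_eq_of_lt h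
    rw [dif_pos h]
    rw [hz, pvNatDigs, dif_pos rfl]
    simp [pvDigitChar_val m h, Nat.mod_eq_of_lt h]
  · have hlt : m / 10 < m := Nat.div_lt_self (by omega) (by norm_num)
    have hnz : m / 10 ≠ 0 := by omega
    rw [dif_neg h]
    rw [List.map_append, ih (m / 10) hlt hnz]
    simp [pvDigitChar_val _ (Nat.mod_lt _ (by norm_num))]

-- B's loop computes the place-value sums of the even and odd digits
theorem pvGoInv : ∀ (m : Nat) (e o pe po : Int),
    evenOddGo (m : Int) e o pe po
      = (e + (pvValN ((pvNatDigs m).filter pvEvenN) : Int) * pe,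
         o + (pvValN ((pvNatDigs m).filter (fun d => !pvEvenN d)) : Int) * po) := by
  intro m
  induction m using Nat.strong_induction_on with
  | _ m ih =>
  intro e o pe po
  rw [evenOddGo]
  by_cases hm : m = 0
  · subst hm
    simp [pvNatDigs, pvValN]
  · have hpos : (0 : Int) < (m : Int) := by exact_mod_cast Nat.pos_of_ne_zero hm
    rw [dif_pos hpos]
    have hdiv : PySem.Int.floordiv (m : Int) 10 = ((m / 10 : Nat) : Int) := by
      exact_mod_cast PySem.Int.floordiv_natCast m 10
    have hmod : PySem.Int.mod (m : Int) 10 = ((m % 10 : Nat) : Int) := by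
      exact_mod_cast PySem.Int.mod_natCast m 10
    have hmod2 : PySem.Int.mod ((m % 10 : Nat) : Int) 2 = ((m % 10 % 2 : Nat) : Int) := by
      exact_mod_cast PySem.Int.mod_natCast (m % 10) 2
    have hlt : m / 10 < m := Nat.div_lt_self (by omega) (by norm_num)
    have hdigs : pvNatDigs m = pvNatDigs (m / 10) ++ [m % 10] := by
      rw [pvNatDigs, dif_neg hm]
    simp only [hmod, hmod2]
    by_cases hpar : m % 10 % 2 = 0
    · simp only [hpar, Nat.cast_zero]
      rw [if_pos (show (((0:Int)) == 0) = true from rfl), hdiv, ih (m / 10) hlt]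
      have hfe : (pvNatDigs m).filter pvEvenN
          = (pvNatDigs (m / 10)).filter pvEvenN ++ [m % 10] := by
        rw [hdigs, List.filter_append]
        simp [pvEvenN, hpar]
      have hfo : (pvNatDigs m).filter (fun d => !pvEvenN d)
          = (pvNatDigs (m / 10)).filter (fun d => !pvEvenN d) := by
        rw [hdigs, List.filter_append]
        simp [pvEvenN, hpar]
      rw [hfe, hfo, pvValN_append, Prod.mk.injEq]
      refine ⟨?_, rfl⟩
      push_cast
      ring
    · have hpar1 : m % 10 % 2 = 1 := by omega
      simp only [hpar1, Nat.cast_one]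
      rw [if_neg (by decide), hdiv, ih (m / 10) hlt]
      have hodd : pvEvenN (m % 10) = false := by
        simp [pvEvenN]
        omega
      have hfe : (pvNatDigs m).filter pvEvenN
          = (pvNatDigs (m / 10)).filter pvEvenN := by
        rw [hdigs, List.filter_append]
        simp [hodd]
      have hfo : (pvNatDigs m).filter (fun d => !pvEvenN d)
          = (pvNatDigs (m / 10)).filter (fun d => !pvEvenN d) ++ [m % 10] := by
        rw [hdigs, List.filter_append]
        simp [hodd]
      rw [hfe, hfo, pvValN_append, Prod.mk.injEq]
      refine ⟨rfl, ?_⟩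
      push_cast
      ring

-- ===== VERDICT (by name: the statement is the Claim_ definition above) =====
theorem even_and_odd_spec : Claim_equal_even_and_odd := by
  intro n _ hpre
  unfold Spec_even_and_odd even_and_odd even_and_odd_alt
  have hn : n = ((n.toNat : Nat) : Int) := (Int.toNat_of_nonneg hpre).symm
  have htc : PySem.Int.toChars n = pvChDigs n.toNat := by
    rw [PySem.Int.toChars, if_neg (by omega), pvToDigits_eq]
  set m := n.toNat with hmdef
  have hdigs := pvChDigs_digits m
  have hA : (pvChDigs m).foldl pvStepA ([], [])
      = ((pvChDigs m).filter pvEvenC, (pvChDigs m).filter (fun c => !pvEvenC c)) := by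
    simpa using pvFoldA (pvChDigs m) [] []
  -- commute filter with the digit-value map
  have hfc : ∀ (p : Nat → Bool), ((pvChDigs m).filter (fun c => p (pvDOf c))).map pvDOf
      = ((pvChDigs m).map pvDOf).filter p := by
    intro p
    rw [List.filter_map]
    rfl
  have hcongr1 : (pvChDigs m).filter pvEvenC = (pvChDigs m).filter (fun c => pvEvenN (pvDOf c)) := by
    apply List.filter_congr
    intro c hc
    exact pvEvenC_eq c (hdigs c hc)
  have hcongr2 : (pvChDigs m).filter (fun c => !pvEvenC c)
      = (pvChDigs m).filter (fun c => !pvEvenN (pvDOf c)) := by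
    apply List.filter_congr
    intro c hc
    rw [pvEvenC_eq c (hdigs c hc)]
  rw [htc]
  show (let p := (pvChDigs m).foldl pvStepA ([], []);
    if p.1 ≠ [] ∧ p.2 ≠ [] then ((PySem.Int.ofChars? p.1).getD 0, (PySem.Int.ofChars? p.2).getD 0)
    else if p.1 = [] then (0, (PySem.Int.ofChars? p.2).getD 0)
    else ((PySem.Int.ofChars? p.1).getD 0, 0)) = evenOddGo n 0 0 1 1
  -- B's side
  have hB : evenOddGo n 0 0 1 1
      = ((pvValN ((pvNatDigs m).filter pvEvenN) : Int),
         (pvValN ((pvNatDigs m).filter (fun d => !pvEvenN d)) : Int)) := by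
    rw [hn, pvGoInv m 0 0 1 1]
    simp
  rw [hB]
  -- digit-value content of A's two strings
  have hmapE : ((pvChDigs m).filter pvEvenC).map pvDOf = (((pvChDigs m).map pvDOf).filter pvEvenN) := by
    rw [hcongr1, hfc]
  have hmapO : ((pvChDigs m).filter (fun c => !pvEvenC c)).map pvDOf
      = (((pvChDigs m).map pvDOf).filter (fun d => !pvEvenN d)) := by
    rw [hcongr2, hfc (fun d => !pvEvenN d)]
  have hvalE : pvVal ((pvChDigs m).filter pvEvenC)
      = pvValN (((pvChDigs m).map pvDOf).filter pvEvenN) := by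
    rw [pvVal_eq_valN, hmapE]
  have hvalO : pvVal ((pvChDigs m).filter (fun c => !pvEvenC c))
      = pvValN (((pvChDigs m).map pvDOf).filter (fun d => !pvEvenN d)) := by
    rw [pvVal_eq_valN, hmapO]
  -- relate map pvDOf (pvChDigs m) with pvNatDigs m
  by_cases hm0 : m = 0
  · have hch : pvChDigs 0 = ['0'] := by rw [pvChDigs]; decide
    have hnd : pvNatDigs 0 = [] := by rw [pvNatDigs]; rfl
    rw [hm0, hch, hnd]
    decide
  · have hmap : (pvChDigs m).map pvDOf = pvNatDigs m := pvChDigs_map m hm0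
    rw [hmap] at hvalE hvalO
    simp only [hA]
    by_cases e1 : (pvChDigs m).filter pvEvenC = []
    · have hvE0 : pvValN ((pvNatDigs m).filter pvEvenN) = 0 := by
        rw [← hvalE, e1]; rfl
      by_cases e2 : (pvChDigs m).filter (fun c => !pvEvenC c) = []
      · exfalso
        have hlen := List.length_eq_length_filter_add (l := pvChDigs m) pvEvenC
        rw [e1, e2] at hlen
        exact pvChDigs_ne_nil m (List.eq_nil_of_length_eq_zero (by simpa using hlen))
      · simp only [e1, e2, ne_eq, not_true_eq_false, false_and, if_false, if_true]
        rw [pvParse _ e2 (fun c hc => hdigs c (List.mem_of_mem_filter hc))]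
        simp [hvalO, hvE0]
    · by_cases e2 : (pvChDigs m).filter (fun c => !pvEvenC c) = []
      · have hvO0 : pvValN ((pvNatDigs m).filter (fun d => !pvEvenN d)) = 0 := by
          rw [← hvalO, e2]; rfl
        simp only [e1, e2, ne_eq, not_false_eq_true, not_true_eq_false, and_false, if_false]
        rw [pvParse _ e1 (fun c hc => hdigs c (List.mem_of_mem_filter hc))]
        simp [hvalE, hvO0]
      · simp only [e1, e2, ne_eq, not_false_eq_true, and_true, if_true]
        rw [pvParse _ e1 (fun c hc => hdigs c (List.mem_of_mem_filter hc)),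
            pvParse _ e2 (fun c hc => hdigs c (List.mem_of_mem_filter hc))]
        simp [hvalE, hvalO]
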